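-- pv_equiv track=rewrite | github.com/buntingszn/cribbage | backend/game_logic/pegging.py | score_peg_pairs
-- ===== SOURCE A (Python) =====
-- def score_peg_pairs(cards: list[str]) -> int:
--     """
--     Score pairs at end of pegging sequence.
--     Must be consecutive same-rank cards ending with the last played card.
--     """
--     if len(cards) < 2:
--         return 0
--
--     last_rank = cards[-1][0]
--     count = 1
--
--     for card in reversed(cards[:-1]):
--         if card[0] == last_rank:
--             count += 1
--         else:
--             break
--
--     # 1 card = 0, 2 cards = 2 (1 pair), 3 cards = 6 (3 pairs), 4 cards = 12 (6 pairs)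
--     if count >= 2:
--         return count * (count - 1)
--     return 0
-- ===== SOURCE B (Python) =====
-- from itertools import groupby
--
--
-- def score_peg_pairs(cards: list[str]) -> int:
--     # Forward pass: group consecutive same-rank cards; keep the length of the
--     # last group (the run ending with the final played card).
--     n = 0
--     for _, group in groupby(cards, key=lambda c: c[0]):
--         n = sum(1 for _ in group)
--     return n * (n - 1) if n >= 2 else 0
-- ===== Notes on version B (the rewrite author's own statement) =====
-- stated objective: idiomatic
-- what changed: Replaced A's backward scan-with-break from the last card by a forward itertools.groupby pass over maximal consecutive same-rank runs, keeping the length of the final group; empty and single-card inputs fall out of the same formula with no separate length guard.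
-- outside the precondition, e.g. on score_peg_pairs(['', '4h', '5d']): A returns 0, B raises IndexError
import Mathlib
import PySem

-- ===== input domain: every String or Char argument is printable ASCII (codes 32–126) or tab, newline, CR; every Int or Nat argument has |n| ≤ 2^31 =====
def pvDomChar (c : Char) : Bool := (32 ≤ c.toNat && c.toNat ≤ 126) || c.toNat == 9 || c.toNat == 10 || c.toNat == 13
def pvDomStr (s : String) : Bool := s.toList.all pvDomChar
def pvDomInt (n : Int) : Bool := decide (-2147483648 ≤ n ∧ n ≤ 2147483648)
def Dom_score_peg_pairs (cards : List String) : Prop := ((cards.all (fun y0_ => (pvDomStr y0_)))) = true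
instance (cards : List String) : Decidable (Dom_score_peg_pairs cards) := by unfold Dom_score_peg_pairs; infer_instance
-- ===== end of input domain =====

-- B is an idiomatic forward groupby pass keeping the final run's length; A scans backward with break.
-- ===== PORT A =====
-- the backward for-loop with break: stops at the first card whose rank differs
def pegA (lr : Char) : List String → Int → Int
  | [], count => count
  | c :: rest, count =>
    match PySem.Str.pyGet? c 0 with
    | none => count            -- Python raises here (card == ""); excluded by Pre_
    | some ch => if ch = lr then pegA lr rest (count + 1) else count

def score_peg_pairs (cards : List String) : Int :=
  if cards.length < 2 then 0
  else
    match (PySem.List.pyGet? cards (-1)).bind (fun s => PySem.Str.pyGet? s 0) with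
    | none => 0                -- Python raises here; excluded by Pre_
    | some lastRank =>
      let count := pegA lastRank (PySem.List.slice cards none (some (-1))).reverse 1
      if count ≥ 2 then count * (count - 1) else 0

-- ===== PORT B =====
-- transliteration of the groupby loop: one forward fold tracking (current key, current run length);
-- after the fold, the count is the length of the last maximal consecutive same-rank run
def stepB (st : Option Char × Int) (c : String) : Option Char × Int :=
  let k := PySem.Str.pyGet? c 0   -- groupby key c[0]; none = Python raises (excluded by Pre_)
  if k = st.1 then (st.1, st.2 + 1) else (k, 1)

def score_peg_pairs_alt (cards : List String) : Int :=
  let n := (cards.foldl stepB (none, 0)).2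
  if n ≥ 2 then n * (n - 1) else 0

-- ===== PRECONDITION & SPEC =====
-- Pre_ excludes lists containing an empty string: card[0] raises IndexError in Python wherever
-- either implementation reaches it (B always does; A returns on some such inputs, see cites).
def Pre_score_peg_pairs (cards : List String) : Prop := ∀ s ∈ cards, s ≠ ""
instance (cards : List String) : Decidable (Pre_score_peg_pairs cards) := by unfold Pre_score_peg_pairs; infer_instance
def pvWitness_score_peg_pairs : List String := ["5h", "5d", "Kc"]
def Spec_score_peg_pairs (cards : List String) (out : Int) : Prop := out = score_peg_pairs_alt cards
instance (cards : List String) (out : Int) : Decidable (Spec_score_peg_pairs cards out) := by unfold Spec_score_peg_pairs; infer_instance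

-- ===== CLAIM (what is proved, stated in full; the proofs are below) =====
def Claim_equal_score_peg_pairs : Prop := ∀ (cards : List String), Dom_score_peg_pairs cards → Pre_score_peg_pairs cards → Spec_score_peg_pairs cards (score_peg_pairs cards)

-- ===== LEMMAS AND PROOFS =====

-- first character of a card, as the ports see it
def hd (s : String) : Option Char := PySem.Str.pyGet? s 0

lemma hd_some_of_ne_empty {s : String} (h : s ≠ "") : ∃ c, hd s = some c := by
  have : s.toList ≠ [] := by
    intro he
    apply h
    have := congrArg String.ofList he
    simpa using this
  cases hl : s.toList with
  | nil => exact absurd hl this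
  | cons c t => exact ⟨c, by simp [hd, PySem.Str.pyGet?_natCast, hl]⟩

-- A's loop counts the takeWhile prefix
lemma pegA_eq (lr : Char) : ∀ (l : List String) (n : Int),
    (∀ s ∈ l, s ≠ "") →
    pegA lr l n = n + ((l.takeWhile (fun c => hd c = some lr)).length : Int) := by
  intro l
  induction l with
  | nil => intro n _; simp [pegA]
  | cons c rest ih =>
    intro n hne
    obtain ⟨ch, hch⟩ := hd_some_of_ne_empty (hne c (by simp))
    by_cases h : ch = lr
    · have := ih (n + 1) (fun s hs => hne s (by simp [hs]))
      simp [pegA, hd] at hch ⊢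
      rw [hch]
      simp [h, List.takeWhile, hd, hch, this]
      ring
    · simp [pegA, hd] at hch ⊢
      rw [hch]
      simp [h, List.takeWhile, hd, hch]

-- B's fold: invariant via reverse induction; needs the sentinel key never to match,
-- which holds because the initial key is `none` and every real key is `some _`.
lemma foldB_append (l : List String) (x : String) (k : Option Char) (n : Int)
    (hx : hd x ≠ k) (hl : ∀ s ∈ l, hd s ≠ k) :
    (l ++ [x]).foldl stepB (k, n)
      = (hd x, 1 + ((l.reverse.takeWhile (fun c => hd c = hd x)).length : Int)) := by
  induction l using List.reverseRecOn generalizing x with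
  | nil =>
    simp only [List.nil_append, List.foldl_cons, List.foldl_nil]
    simp [stepB, hd] at hx ⊢
    simp [hx]
  | append_singleton l' b ih =>
    have hb : hd b ≠ k := hl b (by simp)
    have hl' : ∀ s ∈ l', hd s ≠ k := fun s hs => hl s (by simp [hs])
    have inner := ih b hb hl'
    have : (l' ++ [b] ++ [x]).foldl stepB (k, n)
        = stepB ((l' ++ [b]).foldl stepB (k, n)) x := by
      rw [List.append_assoc, List.foldl_append]; simp
    rw [this, inner]
    by_cases hxb : hd x = hd b
    · simp [stepB, hd] at hxb ⊢
      simp [hxb, List.takeWhile]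
      try rfl
      try ring
    · simp [stepB, hd] at hxb ⊢
      simp [hxb, List.takeWhile, Ne.symm hxb]

-- ===== VERDICT (by name: the statement is the Claim_ definition above) =====
theorem score_peg_pairs_spec : Claim_equal_score_peg_pairs := by
  intro cards _ hpre
  unfold Spec_score_peg_pairs
  rcases hx : cards.getLast? with _ | x
  · -- cards = []
    have : cards = [] := by cases cards <;> simp_all [List.getLast?_concat]
    subst this
    simp [score_peg_pairs, score_peg_pairs_alt]
  · obtain ⟨l, rfl⟩ : ∃ l, cards = l ++ [x] := by
      rcases List.eq_nil_or_concat cards with h | ⟨l, y, rfl⟩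
      · simp [h] at hx
      · exact ⟨l, by simp [List.getLast?_concat] at hx; simp [hx]⟩
    obtain ⟨lr, hlr⟩ := hd_some_of_ne_empty (hpre x (by simp))
    have hne : ∀ s ∈ l, s ≠ "" := fun s hs => hpre s (by simp [hs])
    -- B's count
    have hxk : hd x ≠ none := by simp [hlr]
    have hlk : ∀ s ∈ l, hd s ≠ none := by
      intro s hs
      obtain ⟨c, hc⟩ := hd_some_of_ne_empty (hne s hs)
      simp [hc]
    have hB := foldB_append l x none 0 hxk hlk
    -- A's count: the slice (l++[x])[:-1] is l
    have hslice : PySem.List.slice (l ++ [x]) none (some (-1)) = l := by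
      rw [PySem.List.slice_to_neg_one]; simp
    have hget : (PySem.List.pyGet? (l ++ [x]) (-1)).bind (fun s => PySem.Str.pyGet? s 0)
        = some lr := by
      have : PySem.List.pyGet? (l ++ [x]) (-1) = some x := by
        simp [PySem.List.pyGet?, PySem.List.pyIdx?]
      simp [this]; exact hlr
    have hA := pegA_eq lr l.reverse 1 (fun s hs => hne s (by simpa using hs))
    -- put both sides in takeWhile form and compare
    by_cases hlen : (l ++ [x]).length < 2
    · -- l = [], both give 0
      have hl0 : l = [] := by
        rcases l with _ | ⟨a, t⟩
        · rfl
        · simp at hlen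
      subst hl0
      have hA0 : score_peg_pairs ([] ++ [x]) = 0 := by simp [score_peg_pairs]
      have hB0 : score_peg_pairs_alt ([] ++ [x]) = 0 := by
        simp only [score_peg_pairs_alt, List.nil_append, List.foldl_cons, List.foldl_nil, stepB]
        split <;> norm_num
      rw [hA0, hB0]
    · simp only [score_peg_pairs, score_peg_pairs_alt, hB, hget, hslice, if_neg hlen, hA]
      simp only [hd] at hlr ⊢
      simp only [hlr]
      try rfl
      try simp
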